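-- pv_equiv track=rewrite | github.com/kmmelcher/FMCC2-Projeto | algoritmos.py | get_A
-- ===== SOURCE A (Python) =====
-- def is_primo(numero):
--     """ Checa se um número é primo
--
--     autores Kilian
--     """
--     if numero == 1: return False
--
--     for i in range(2, numero//2+1):
--         if (numero % i) == 0:
--             return False
--     return True
--
-- def get_fatores_primos(numero):
--     """ Retorna os fatores primos do número
--
--     autores Kilian
--     """
--     fatores = []
--
--     for i in range(1, numero//2+1):
--         if is_primo(i) and numero % i == 0:
--             fatores.append(i)
--
--     return fatores
--
-- def get_A(m):
--     """
--     Condições de A: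
--     p: 4 | M
--     q: 4 | A-1
--     r: A > 0
--     s: A-1 é divisivel por todos os fatores primos de m.
--     (p → q) ∧ r ∧ s
--
--     autores Kilian, Daniel
--     """
--     a = 1
--     if m % 4 == 0:
--         a = 5
--
--     fatores = get_fatores_primos(m)
--
--     while True:
--         for f in fatores:
--             if (a-1) % f == 0:
--                 return a
--         a += 1
-- ===== SOURCE B (Python) =====
-- def get_A(m):
--     """Closed form.
--
--     A searches for the smallest a >= start (start = 5 if 4 | m else 1) such
--     that a-1 is divisible by some prime factor of m.  When the start is 1,
--     a-1 = 0 is divisible by every factor, so the answer is 1.  When 4 | m,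
--     2 is a prime factor of m and 4 = 5-1 is even, so the answer is 5.
--     (Requires m to actually have a prime factor <= m//2, i.e. m >= 4 and
--     composite -- otherwise A never terminates.)
--     """
--     return 5 if m % 4 == 0 else 1
-- ===== Notes on version B (the rewrite author's own statement) =====
-- stated objective: faster
-- what changed: Replaced the O(m^2) prime-factor enumeration plus unbounded search with a closed form: a-1=0 is divisible by every factor so the answer is 1 unless 4|m, in which case 2 divides m and the answer is 5.
-- outside the precondition, e.g. on get_A(2): A does not finish within the time limit, B returns 1; on get_A(5): A does not finish within the time limit, B returns 1; on get_A(0): A does not finish within the time limit, B returns 5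
import Mathlib
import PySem

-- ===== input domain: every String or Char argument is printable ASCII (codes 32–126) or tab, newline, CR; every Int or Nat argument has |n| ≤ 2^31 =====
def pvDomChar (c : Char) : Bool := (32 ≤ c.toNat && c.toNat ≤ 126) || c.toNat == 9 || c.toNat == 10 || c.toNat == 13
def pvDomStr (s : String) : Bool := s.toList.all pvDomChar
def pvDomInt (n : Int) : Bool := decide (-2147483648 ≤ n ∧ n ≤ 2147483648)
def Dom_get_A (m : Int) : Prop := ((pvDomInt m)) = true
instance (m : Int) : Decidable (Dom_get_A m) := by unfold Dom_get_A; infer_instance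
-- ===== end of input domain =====

-- B replaces A's O(m^2) factor enumeration + search loop by a closed form (the search
-- always succeeds on its first iteration); equivalence is about the return value only.

-- ===== PORT A =====
-- port of is_primo: the early-return loop over range(2, numero//2+1) is List.all
def is_primo (numero : Int) : Bool :=
  if numero == 1 then false
  else (PySem.List.pyRange 2 (PySem.Int.floordiv numero 2 + 1) 1).all
        (fun i => !(PySem.Int.mod numero i == 0))

-- port of get_fatores_primos: the appending loop over range(1, numero//2+1)
def get_fatores_primos (numero : Int) : List Int :=
  (PySem.List.pyRange 1 (PySem.Int.floordiv numero 2 + 1) 1).foldl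
    (fun fatores i =>
      if is_primo i && (PySem.Int.mod numero i == 0) then fatores ++ [i] else fatores)
    []

-- the 'while True' loop of get_A; under Pre_ it returns on its first iteration, the
-- fuel (never exhausted on Pre_) only makes the unbounded Python loop total in Lean
def get_A_loop (fatores : List Int) (a : Int) : Nat → Int
  | 0 => a
  | fuel + 1 =>
    if fatores.any (fun f => PySem.Int.mod (a - 1) f == 0) then a
    else get_A_loop fatores (a + 1) fuel

def get_A (m : Int) : Int :=
  let a : Int := if PySem.Int.mod m 4 == 0 then 5 else 1
  let fatores := get_fatores_primos m
  get_A_loop fatores a (m.toNat + 10)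

-- ===== PORT B =====
def get_A_alt (m : Int) : Int :=
  if PySem.Int.mod m 4 == 0 then 5 else 1

-- ===== PRECONDITION & SPEC =====
-- Pre_ excludes exactly the inputs where A never returns: if m < 4 or m is prime, m has
-- no prime factor ≤ m//2, fatores is empty and A's 'while True' loop runs forever.
def Pre_get_A (m : Int) : Prop := 4 ≤ m ∧ ¬ Nat.Prime m.toNat
instance (m : Int) : Decidable (Pre_get_A m) := by unfold Pre_get_A; infer_instance
def pvWitness_get_A : Int := (12)
def Spec_get_A (m : Int) (out : Int) : Prop := out = get_A_alt m
instance (m : Int) (out : Int) : Decidable (Spec_get_A m out) := by unfold Spec_get_A; infer_instance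

-- ===== CLAIM (what is proved, stated in full; the proofs are below) =====
def Claim_equal_get_A : Prop := ∀ (m : Int), Dom_get_A m → Pre_get_A m → Spec_get_A m (get_A m)

-- ===== LEMMAS AND PROOFS =====

theorem foldl_filter_mem_of {P : Int → Bool} (l : List Int) (acc : List Int) (x : Int)
    (h : x ∈ acc ∨ (x ∈ l ∧ P x = true)) :
    x ∈ l.foldl (fun fs i => if P i then fs ++ [i] else fs) acc := by
  induction l generalizing acc with
  | nil => simpa using h
  | cons a t ih =>
    simp only [List.foldl_cons]
    apply ih
    rcases h with h | ⟨hm, hp⟩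
    · left; split <;> simp [h]
    · rcases List.mem_cons.mp hm with rfl | hm
      · left; simp [hp]
      · right; exact ⟨hm, hp⟩

-- a number in the range with a true predicate lands in fatores
theorem mem_fatores (m i : Int) (hmem : i ∈ PySem.List.pyRange 1 (PySem.Int.floordiv m 2 + 1) 1)
    (hp : (is_primo i && (PySem.Int.mod m i == 0)) = true) :
    i ∈ get_fatores_primos m := by
  unfold get_fatores_primos
  exact foldl_filter_mem_of _ _ _ (Or.inr ⟨hmem, hp⟩)

-- the minimal prime factor of m is in fatores
theorem minFac_mem_fatores (m : Int) (h4 : 4 ≤ m) (hnp : ¬ Nat.Prime m.toNat) :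
    ((m.toNat.minFac : Nat) : Int) ∈ get_fatores_primos m := by
  set n := m.toNat with hn
  have hmn : (n : Int) = m := Int.toNat_of_nonneg (by omega)
  have hn4 : 4 ≤ n := by omega
  have hprime : Nat.Prime n.minFac := Nat.minFac_prime (by omega)
  have hdvd : n.minFac ∣ n := Nat.minFac_dvd n
  have hle : n.minFac ≤ n / 2 := le_trans (Nat.minFac_le_div (by omega) hnp) (Nat.div_le_div_left hprime.two_le (by norm_num))
  have h2p : 2 ≤ n.minFac := hprime.two_le
  apply mem_fatores
  · rw [PySem.List.mem_pyRange_one]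
    have hfd : PySem.Int.floordiv m 2 = m / 2 := PySem.Int.floordiv_eq_ediv_of_pos (by norm_num)
    constructor
    · exact_mod_cast Nat.one_le_iff_ne_zero.mpr (by omega)
    · rw [hfd]
      have : ((n / 2 : Nat) : Int) = m / 2 := by rw [← hmn]; exact_mod_cast (Int.natCast_div n 2).symm
      omega
  · rw [Bool.and_eq_true]
    constructor
    · -- is_primo of a prime is true
      unfold is_primo
      have hne1 : ((n.minFac : Nat) : Int) ≠ 1 := by exact_mod_cast (by omega : (n.minFac : Int) ≠ 1)
      rw [if_neg (by simpa using hne1)]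
      rw [List.all_eq_true]
      intro i hi
      rw [PySem.List.mem_pyRange_one] at hi
      have hfd : PySem.Int.floordiv (n.minFac : Int) 2 = (n.minFac : Int) / 2 :=
        PySem.Int.floordiv_eq_ediv_of_pos (by norm_num)
      rw [hfd] at hi
      have hi2 : 2 ≤ i := hi.1
      have hilt : i < (n.minFac : Int) := by omega
      simp only [Bool.not_eq_eq_eq_not, Bool.not_true, beq_eq_false_iff_ne, ne_eq]
      intro hmod
      rw [PySem.Int.mod_eq_emod_of_pos (by omega)] at hmod
      have hidvd : i ∣ (n.minFac : Int) := Int.dvd_of_emod_eq_zero hmod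
      have : i.toNat ∣ n.minFac := by
        rw [← Int.natCast_dvd_natCast]
        rwa [Int.toNat_of_nonneg (by omega)]
      rcases (Nat.Prime.eq_one_or_self_of_dvd hprime _ this) with h1 | h1 <;> omega
    · -- m % minFac == 0
      rw [PySem.Int.mod_eq_emod_of_pos (by exact_mod_cast (by omega : (0:Int) < n.minFac))]
      have : ((n.minFac : Nat) : Int) ∣ m := by rw [← hmn]; exact_mod_cast hdvd
      simp [Int.emod_eq_zero_of_dvd this]

-- ===== VERDICT (by name: the statement is the Claim_ definition above) =====
theorem get_A_spec : Claim_equal_get_A := by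
  intro m _ hpre
  obtain ⟨h4, hnp⟩ := hpre
  unfold Spec_get_A get_A get_A_alt
  have hp := minFac_mem_fatores m h4 hnp
  have hp2 : 2 ≤ ((m.toNat.minFac : Nat) : Int) := by
    exact_mod_cast (Nat.minFac_prime (by omega : m.toNat ≠ 1)).two_le
  have hfuel : m.toNat + 10 = (m.toNat + 9) + 1 := by omega
  rw [hfuel]
  by_cases h4m : PySem.Int.mod m 4 == 0
  · simp only [h4m, if_true]
    rw [get_A_loop]
    rw [if_pos]
    rw [List.any_eq_true]
    refine ⟨2, ?_, by decide⟩
    apply mem_fatores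
    · rw [PySem.List.mem_pyRange_one]
      have hfd : PySem.Int.floordiv m 2 = m / 2 := PySem.Int.floordiv_eq_ediv_of_pos (by norm_num)
      rw [hfd]; omega
    · rw [Bool.and_eq_true]
      refine ⟨by decide, ?_⟩
      rw [PySem.Int.mod_eq_emod_of_pos (by norm_num : (0:Int) < 2)]
      rw [PySem.Int.mod_eq_emod_of_pos (by norm_num : (0:Int) < 4)] at h4m
      simp only [beq_iff_eq] at h4m ⊢
      omega
  · simp only [h4m]
    rw [get_A_loop]
    rw [if_pos]
    rw [List.any_eq_true]
    refine ⟨_, hp, ?_⟩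
    rw [PySem.Int.mod_eq_emod_of_pos (by omega)]
    simp
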